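-- pv_equiv track=rewrite | github.com/Ti765/conect | src/app/classify-suppliers/Classificador_v1.py | _classificar_cfops
-- ===== SOURCE A (Python) =====
-- GROUP_CFOP = {
--     "COMBUSTÍVEIS E LUBRIFICANTES": ["5653", "5656", "6653", "6656", "7667"],
--     "CONSERTOS": ["5915", "5916", "6915", "6916"],
--     "DEMONSTRAÇÕES": ["5912", "5913", "6912", "6913"],
--     "DEVOLUÇÕES": [
--         "5201","5202","5208","5209","5210","5410","5411","5412","5413",
--         "5553","5555","5556","5918","5919","6201","6202","6208","6209",
--         "6210","6410","6411","6412","6413","6553","6555","6556","6918",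
--         "6919","7201","7202","7210","7211","7212"
--     ],
--     "ENERGIA ELÉTRICA": [
--         "5153","5207","5251","5252","5253","5254","5255","5256",
--         "5257","5258","6153","6207","6251","6252","6253","6254",
--         "6255","6256","6257","6258","7207","7251"
--     ],
--     "SERVIÇOS": [
--         "5205","5301","5302","5303","5304","5305","5306","5307","5932",
--         "5933","6205","6301","6302","6303","6304","6305","6306","6307",
--         "6932","6933","7205","7301"
--     ],
--     "TRANSPORTE": [
--         "5206","5351","5352","5353","5354","5355","5356","5357","5359",
--         "5360","6206","6351","6352","6353","6354","6355","6356","6357",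
--         "6359","6360","7206","7358"
--     ],
--     "TRANSFERÊNCIAS": [
--         "5151","5152","5155","5156","5408","5409","5552","5557",
--         "6151","6152","6155","6156","6408","6409","6552","6557"
--     ],
--     "BONIFICAÇÕES E BRINDES": ["5910", "6910"],
--     "REMESSAS": ["5920", "6920"],
--     "OUTRAS": ["5601","5602","5605","5929","5949","6929","6949","7949"],
-- }
--
-- ALL_CFOPS = {cf for lst in GROUP_CFOP.values() for cf in lst}
--
-- def _classificar_cfops(cfops: set[str]) -> tuple[str, str]:
--     if any(c not in ALL_CFOPS for c in cfops):
--         return "PASSAR PARA CLASSIFICADOR", "Regra 1"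
--     grupos = {g for g, l in GROUP_CFOP.items() if cfops & set(l)}
--     if len(cfops) == 1:
--         return (next(iter(grupos)) if grupos else "OUTRAS", "Regra 3")
--     if len(grupos) == 1:
--         g = next(iter(grupos))
--         return (g if g != "OUTRAS" else "OUTRAS", "Regra 2-b")
--     return "OUTRAS", "Regra 2"
-- ===== SOURCE B (Python) =====
-- CFOP_TO_GROUP = {
--     "5653": "COMBUSTÍVEIS E LUBRIFICANTES",
--     "5656": "COMBUSTÍVEIS E LUBRIFICANTES",
--     "6653": "COMBUSTÍVEIS E LUBRIFICANTES",
--     "6656": "COMBUSTÍVEIS E LUBRIFICANTES",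
--     "7667": "COMBUSTÍVEIS E LUBRIFICANTES",
--     "5915": "CONSERTOS",
--     "5916": "CONSERTOS",
--     "6915": "CONSERTOS",
--     "6916": "CONSERTOS",
--     "5912": "DEMONSTRAÇÕES",
--     "5913": "DEMONSTRAÇÕES",
--     "6912": "DEMONSTRAÇÕES",
--     "6913": "DEMONSTRAÇÕES",
--     "5201": "DEVOLUÇÕES",
--     "5202": "DEVOLUÇÕES",
--     "5208": "DEVOLUÇÕES",
--     "5209": "DEVOLUÇÕES",
--     "5210": "DEVOLUÇÕES",
--     "5410": "DEVOLUÇÕES",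
--     "5411": "DEVOLUÇÕES",
--     "5412": "DEVOLUÇÕES",
--     "5413": "DEVOLUÇÕES",
--     "5553": "DEVOLUÇÕES",
--     "5555": "DEVOLUÇÕES",
--     "5556": "DEVOLUÇÕES",
--     "5918": "DEVOLUÇÕES",
--     "5919": "DEVOLUÇÕES",
--     "6201": "DEVOLUÇÕES",
--     "6202": "DEVOLUÇÕES",
--     "6208": "DEVOLUÇÕES",
--     "6209": "DEVOLUÇÕES",
--     "6210": "DEVOLUÇÕES",
--     "6410": "DEVOLUÇÕES",
--     "6411": "DEVOLUÇÕES",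
--     "6412": "DEVOLUÇÕES",
--     "6413": "DEVOLUÇÕES",
--     "6553": "DEVOLUÇÕES",
--     "6555": "DEVOLUÇÕES",
--     "6556": "DEVOLUÇÕES",
--     "6918": "DEVOLUÇÕES",
--     "6919": "DEVOLUÇÕES",
--     "7201": "DEVOLUÇÕES",
--     "7202": "DEVOLUÇÕES",
--     "7210": "DEVOLUÇÕES",
--     "7211": "DEVOLUÇÕES",
--     "7212": "DEVOLUÇÕES",
--     "5153": "ENERGIA ELÉTRICA",
--     "5207": "ENERGIA ELÉTRICA",
--     "5251": "ENERGIA ELÉTRICA",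
--     "5252": "ENERGIA ELÉTRICA",
--     "5253": "ENERGIA ELÉTRICA",
--     "5254": "ENERGIA ELÉTRICA",
--     "5255": "ENERGIA ELÉTRICA",
--     "5256": "ENERGIA ELÉTRICA",
--     "5257": "ENERGIA ELÉTRICA",
--     "5258": "ENERGIA ELÉTRICA",
--     "6153": "ENERGIA ELÉTRICA",
--     "6207": "ENERGIA ELÉTRICA",
--     "6251": "ENERGIA ELÉTRICA",
--     "6252": "ENERGIA ELÉTRICA",
--     "6253": "ENERGIA ELÉTRICA",
--     "6254": "ENERGIA ELÉTRICA",
--     "6255": "ENERGIA ELÉTRICA",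
--     "6256": "ENERGIA ELÉTRICA",
--     "6257": "ENERGIA ELÉTRICA",
--     "6258": "ENERGIA ELÉTRICA",
--     "7207": "ENERGIA ELÉTRICA",
--     "7251": "ENERGIA ELÉTRICA",
--     "5205": "SERVIÇOS",
--     "5301": "SERVIÇOS",
--     "5302": "SERVIÇOS",
--     "5303": "SERVIÇOS",
--     "5304": "SERVIÇOS",
--     "5305": "SERVIÇOS",
--     "5306": "SERVIÇOS",
--     "5307": "SERVIÇOS",
--     "5932": "SERVIÇOS",
--     "5933": "SERVIÇOS",
--     "6205": "SERVIÇOS",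
--     "6301": "SERVIÇOS",
--     "6302": "SERVIÇOS",
--     "6303": "SERVIÇOS",
--     "6304": "SERVIÇOS",
--     "6305": "SERVIÇOS",
--     "6306": "SERVIÇOS",
--     "6307": "SERVIÇOS",
--     "6932": "SERVIÇOS",
--     "6933": "SERVIÇOS",
--     "7205": "SERVIÇOS",
--     "7301": "SERVIÇOS",
--     "5206": "TRANSPORTE",
--     "5351": "TRANSPORTE",
--     "5352": "TRANSPORTE",
--     "5353": "TRANSPORTE",
--     "5354": "TRANSPORTE",
--     "5355": "TRANSPORTE",
--     "5356": "TRANSPORTE",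
--     "5357": "TRANSPORTE",
--     "5359": "TRANSPORTE",
--     "5360": "TRANSPORTE",
--     "6206": "TRANSPORTE",
--     "6351": "TRANSPORTE",
--     "6352": "TRANSPORTE",
--     "6353": "TRANSPORTE",
--     "6354": "TRANSPORTE",
--     "6355": "TRANSPORTE",
--     "6356": "TRANSPORTE",
--     "6357": "TRANSPORTE",
--     "6359": "TRANSPORTE",
--     "6360": "TRANSPORTE",
--     "7206": "TRANSPORTE",
--     "7358": "TRANSPORTE",
--     "5151": "TRANSFERÊNCIAS",
--     "5152": "TRANSFERÊNCIAS",
--     "5155": "TRANSFERÊNCIAS",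
--     "5156": "TRANSFERÊNCIAS",
--     "5408": "TRANSFERÊNCIAS",
--     "5409": "TRANSFERÊNCIAS",
--     "5552": "TRANSFERÊNCIAS",
--     "5557": "TRANSFERÊNCIAS",
--     "6151": "TRANSFERÊNCIAS",
--     "6152": "TRANSFERÊNCIAS",
--     "6155": "TRANSFERÊNCIAS",
--     "6156": "TRANSFERÊNCIAS",
--     "6408": "TRANSFERÊNCIAS",
--     "6409": "TRANSFERÊNCIAS",
--     "6552": "TRANSFERÊNCIAS",
--     "6557": "TRANSFERÊNCIAS",
--     "5910": "BONIFICAÇÕES E BRINDES",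
--     "6910": "BONIFICAÇÕES E BRINDES",
--     "5920": "REMESSAS",
--     "6920": "REMESSAS",
--     "5601": "OUTRAS",
--     "5602": "OUTRAS",
--     "5605": "OUTRAS",
--     "5929": "OUTRAS",
--     "5949": "OUTRAS",
--     "6929": "OUTRAS",
--     "6949": "OUTRAS",
--     "7949": "OUTRAS",
-- }
--
--
-- def _classificar_cfops(cfops: set[str]) -> tuple[str, str]:
--     grupos = set()
--     for c in cfops:
--         g = CFOP_TO_GROUP.get(c)
--         if g is None:
--             return "PASSAR PARA CLASSIFICADOR", "Regra 1"
--         grupos.add(g)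
--     if len(cfops) == 1:
--         return (next(iter(grupos)) if grupos else "OUTRAS", "Regra 3")
--     if len(grupos) == 1:
--         return next(iter(grupos)), "Regra 2-b"
--     return "OUTRAS", "Regra 2"
-- ===== Notes on version B (the rewrite author's own statement) =====
-- stated objective: alternative
-- what changed: B replaces A's scan over all 11 groups (rebuilding each group's set and intersecting it with the input) by a flat reverse-index dict code->group and a single early-exit loop over the input codes that returns Regra 1 on the first unknown code and otherwise accumulates the set of groups by direct lookup; B also drops A's redundant 'g if g != OUTRAS else OUTRAS' branch.
import Mathlib
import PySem

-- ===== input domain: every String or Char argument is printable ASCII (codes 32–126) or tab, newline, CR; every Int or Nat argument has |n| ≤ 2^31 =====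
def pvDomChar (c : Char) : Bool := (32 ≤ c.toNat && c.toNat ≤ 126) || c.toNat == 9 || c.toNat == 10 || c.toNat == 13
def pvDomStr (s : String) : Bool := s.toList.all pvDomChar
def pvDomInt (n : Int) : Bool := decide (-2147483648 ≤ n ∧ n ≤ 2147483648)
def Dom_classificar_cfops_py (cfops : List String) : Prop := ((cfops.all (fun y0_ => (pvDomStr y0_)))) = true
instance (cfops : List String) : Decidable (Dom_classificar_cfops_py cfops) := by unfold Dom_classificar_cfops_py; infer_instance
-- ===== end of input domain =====

-- B replaces A's per-group set-rebuild-and-intersect scan by a flat literal reverse index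
-- CFOP code → group name (a dict) and one early-exit recursive pass over the input set
-- collecting the groups (objective: idiomatic/alternative; same measured cost). The Python
-- set argument is the list of its distinct elements; set-iteration order is consumed only
-- where the set is empty or a singleton, so the result does not depend on hash order.

-- ===== PORT A =====
def GROUP_CFOP : List (String × List String) := [
  ("COMBUSTÍVEIS E LUBRIFICANTES", ["5653", "5656", "6653", "6656", "7667"]),
  ("CONSERTOS", ["5915", "5916", "6915", "6916"]),
  ("DEMONSTRAÇÕES", ["5912", "5913", "6912", "6913"]),
  ("DEVOLUÇÕES", ["5201", "5202", "5208", "5209", "5210", "5410", "5411", "5412", "5413", "5553", "5555", "5556", "5918", "5919", "6201", "6202", "6208", "6209", "6210", "6410", "6411", "6412", "6413", "6553", "6555", "6556", "6918", "6919", "7201", "7202", "7210", "7211", "7212"]),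
  ("ENERGIA ELÉTRICA", ["5153", "5207", "5251", "5252", "5253", "5254", "5255", "5256", "5257", "5258", "6153", "6207", "6251", "6252", "6253", "6254", "6255", "6256", "6257", "6258", "7207", "7251"]),
  ("SERVIÇOS", ["5205", "5301", "5302", "5303", "5304", "5305", "5306", "5307", "5932", "5933", "6205", "6301", "6302", "6303", "6304", "6305", "6306", "6307", "6932", "6933", "7205", "7301"]),
  ("TRANSPORTE", ["5206", "5351", "5352", "5353", "5354", "5355", "5356", "5357", "5359", "5360", "6206", "6351", "6352", "6353", "6354", "6355", "6356", "6357", "6359", "6360", "7206", "7358"]),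
  ("TRANSFERÊNCIAS", ["5151", "5152", "5155", "5156", "5408", "5409", "5552", "5557", "6151", "6152", "6155", "6156", "6408", "6409", "6552", "6557"]),
  ("BONIFICAÇÕES E BRINDES", ["5910", "6910"]),
  ("REMESSAS", ["5920", "6920"]),
  ("OUTRAS", ["5601", "5602", "5605", "5929", "5949", "6929", "6949", "7949"])
]

def ALL_CFOPS : PySem.Set String := PySem.Set.ofList (GROUP_CFOP.flatMap (fun gl => gl.2))

def classificar_cfops_py (cfops : List String) : String × String :=
  let s : PySem.Set String := PySem.Set.ofList cfops
  if s.any (fun c => !(PySem.Set.contains ALL_CFOPS c)) then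
    ("PASSAR PARA CLASSIFICADOR", "Regra 1")
  else
    let grupos : PySem.Set String :=
      PySem.Set.ofList ((GROUP_CFOP.filter
        (fun gl => !(PySem.Set.inter s (PySem.Set.ofList gl.2)).isEmpty)).map (fun gl => gl.1))
    if PySem.Set.len s = 1 then
      -- next(iter(grupos)): grupos has at most one element here, so hash order is immaterial
      (if !grupos.isEmpty then grupos.headD "" else "OUTRAS", "Regra 3")
    else if PySem.Set.len grupos = 1 then
      let g := grupos.headD ""
      (if g ≠ "OUTRAS" then g else "OUTRAS", "Regra 2-b")
    else ("OUTRAS", "Regra 2")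

-- ===== PORT B =====
-- the literal reverse-index dict of Source B, code → group
def CFOP_TO_GROUP : PySem.Dict String String := PySem.Dict.ofList [
  ("5653", "COMBUSTÍVEIS E LUBRIFICANTES"),
  ("5656", "COMBUSTÍVEIS E LUBRIFICANTES"),
  ("6653", "COMBUSTÍVEIS E LUBRIFICANTES"),
  ("6656", "COMBUSTÍVEIS E LUBRIFICANTES"),
  ("7667", "COMBUSTÍVEIS E LUBRIFICANTES"),
  ("5915", "CONSERTOS"),
  ("5916", "CONSERTOS"),
  ("6915", "CONSERTOS"),
  ("6916", "CONSERTOS"),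
  ("5912", "DEMONSTRAÇÕES"),
  ("5913", "DEMONSTRAÇÕES"),
  ("6912", "DEMONSTRAÇÕES"),
  ("6913", "DEMONSTRAÇÕES"),
  ("5201", "DEVOLUÇÕES"),
  ("5202", "DEVOLUÇÕES"),
  ("5208", "DEVOLUÇÕES"),
  ("5209", "DEVOLUÇÕES"),
  ("5210", "DEVOLUÇÕES"),
  ("5410", "DEVOLUÇÕES"),
  ("5411", "DEVOLUÇÕES"),
  ("5412", "DEVOLUÇÕES"),
  ("5413", "DEVOLUÇÕES"),
  ("5553", "DEVOLUÇÕES"),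
  ("5555", "DEVOLUÇÕES"),
  ("5556", "DEVOLUÇÕES"),
  ("5918", "DEVOLUÇÕES"),
  ("5919", "DEVOLUÇÕES"),
  ("6201", "DEVOLUÇÕES"),
  ("6202", "DEVOLUÇÕES"),
  ("6208", "DEVOLUÇÕES"),
  ("6209", "DEVOLUÇÕES"),
  ("6210", "DEVOLUÇÕES"),
  ("6410", "DEVOLUÇÕES"),
  ("6411", "DEVOLUÇÕES"),
  ("6412", "DEVOLUÇÕES"),
  ("6413", "DEVOLUÇÕES"),
  ("6553", "DEVOLUÇÕES"),
  ("6555", "DEVOLUÇÕES"),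
  ("6556", "DEVOLUÇÕES"),
  ("6918", "DEVOLUÇÕES"),
  ("6919", "DEVOLUÇÕES"),
  ("7201", "DEVOLUÇÕES"),
  ("7202", "DEVOLUÇÕES"),
  ("7210", "DEVOLUÇÕES"),
  ("7211", "DEVOLUÇÕES"),
  ("7212", "DEVOLUÇÕES"),
  ("5153", "ENERGIA ELÉTRICA"),
  ("5207", "ENERGIA ELÉTRICA"),
  ("5251", "ENERGIA ELÉTRICA"),
  ("5252", "ENERGIA ELÉTRICA"),
  ("5253", "ENERGIA ELÉTRICA"),
  ("5254", "ENERGIA ELÉTRICA"),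
  ("5255", "ENERGIA ELÉTRICA"),
  ("5256", "ENERGIA ELÉTRICA"),
  ("5257", "ENERGIA ELÉTRICA"),
  ("5258", "ENERGIA ELÉTRICA"),
  ("6153", "ENERGIA ELÉTRICA"),
  ("6207", "ENERGIA ELÉTRICA"),
  ("6251", "ENERGIA ELÉTRICA"),
  ("6252", "ENERGIA ELÉTRICA"),
  ("6253", "ENERGIA ELÉTRICA"),
  ("6254", "ENERGIA ELÉTRICA"),
  ("6255", "ENERGIA ELÉTRICA"),
  ("6256", "ENERGIA ELÉTRICA"),
  ("6257", "ENERGIA ELÉTRICA"),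
  ("6258", "ENERGIA ELÉTRICA"),
  ("7207", "ENERGIA ELÉTRICA"),
  ("7251", "ENERGIA ELÉTRICA"),
  ("5205", "SERVIÇOS"),
  ("5301", "SERVIÇOS"),
  ("5302", "SERVIÇOS"),
  ("5303", "SERVIÇOS"),
  ("5304", "SERVIÇOS"),
  ("5305", "SERVIÇOS"),
  ("5306", "SERVIÇOS"),
  ("5307", "SERVIÇOS"),
  ("5932", "SERVIÇOS"),
  ("5933", "SERVIÇOS"),
  ("6205", "SERVIÇOS"),
  ("6301", "SERVIÇOS"),
  ("6302", "SERVIÇOS"),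
  ("6303", "SERVIÇOS"),
  ("6304", "SERVIÇOS"),
  ("6305", "SERVIÇOS"),
  ("6306", "SERVIÇOS"),
  ("6307", "SERVIÇOS"),
  ("6932", "SERVIÇOS"),
  ("6933", "SERVIÇOS"),
  ("7205", "SERVIÇOS"),
  ("7301", "SERVIÇOS"),
  ("5206", "TRANSPORTE"),
  ("5351", "TRANSPORTE"),
  ("5352", "TRANSPORTE"),
  ("5353", "TRANSPORTE"),
  ("5354", "TRANSPORTE"),
  ("5355", "TRANSPORTE"),
  ("5356", "TRANSPORTE"),
  ("5357", "TRANSPORTE"),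
  ("5359", "TRANSPORTE"),
  ("5360", "TRANSPORTE"),
  ("6206", "TRANSPORTE"),
  ("6351", "TRANSPORTE"),
  ("6352", "TRANSPORTE"),
  ("6353", "TRANSPORTE"),
  ("6354", "TRANSPORTE"),
  ("6355", "TRANSPORTE"),
  ("6356", "TRANSPORTE"),
  ("6357", "TRANSPORTE"),
  ("6359", "TRANSPORTE"),
  ("6360", "TRANSPORTE"),
  ("7206", "TRANSPORTE"),
  ("7358", "TRANSPORTE"),
  ("5151", "TRANSFERÊNCIAS"),
  ("5152", "TRANSFERÊNCIAS"),
  ("5155", "TRANSFERÊNCIAS"),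
  ("5156", "TRANSFERÊNCIAS"),
  ("5408", "TRANSFERÊNCIAS"),
  ("5409", "TRANSFERÊNCIAS"),
  ("5552", "TRANSFERÊNCIAS"),
  ("5557", "TRANSFERÊNCIAS"),
  ("6151", "TRANSFERÊNCIAS"),
  ("6152", "TRANSFERÊNCIAS"),
  ("6155", "TRANSFERÊNCIAS"),
  ("6156", "TRANSFERÊNCIAS"),
  ("6408", "TRANSFERÊNCIAS"),
  ("6409", "TRANSFERÊNCIAS"),
  ("6552", "TRANSFERÊNCIAS"),
  ("6557", "TRANSFERÊNCIAS"),
  ("5910", "BONIFICAÇÕES E BRINDES"),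
  ("6910", "BONIFICAÇÕES E BRINDES"),
  ("5920", "REMESSAS"),
  ("6920", "REMESSAS"),
  ("5601", "OUTRAS"),
  ("5602", "OUTRAS"),
  ("5605", "OUTRAS"),
  ("5929", "OUTRAS"),
  ("5949", "OUTRAS"),
  ("6929", "OUTRAS"),
  ("6949", "OUTRAS"),
  ("7949", "OUTRAS")
]

-- the for-loop of Source B: walk the input, look each code up, early-return (none) on a miss,
-- otherwise accumulate the group into the running set
def collectGroups (d : PySem.Dict String String) :
    List String → PySem.Set String → Option (PySem.Set String)
  | [], grupos => some grupos
  | c :: rest, grupos =>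
    match d.get? c with
    | none => none
    | some g => collectGroups d rest (PySem.Set.add grupos g)

def classificar_cfops_py_alt (cfops : List String) : String × String :=
  let s : PySem.Set String := PySem.Set.ofList cfops
  match collectGroups CFOP_TO_GROUP s PySem.Set.empty with
  | none => ("PASSAR PARA CLASSIFICADOR", "Regra 1")
  | some grupos =>
    if PySem.Set.len s = 1 then
      (if !grupos.isEmpty then grupos.headD "" else "OUTRAS", "Regra 3")
    else if PySem.Set.len grupos = 1 then (grupos.headD "", "Regra 2-b")
    else ("OUTRAS", "Regra 2")

-- ===== PRECONDITION & SPEC =====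
def Spec_classificar_cfops_py (cfops : List String) (out : String × String) : Prop := out = classificar_cfops_py_alt cfops
instance (cfops : List String) (out : String × String) : Decidable (Spec_classificar_cfops_py cfops out) := by unfold Spec_classificar_cfops_py; infer_instance

-- ===== CLAIM =====
def Claim_equal_classificar_cfops_py : Prop := ∀ (cfops : List String), Dom_classificar_cfops_py cfops → Spec_classificar_cfops_py cfops (classificar_cfops_py cfops)

-- ===== LEMMAS AND PROOFS =====

-- the pair list of A's table, flattened
def CFOP_PAIRS : List (String × String) :=
  GROUP_CFOP.flatMap (fun gl => gl.2.map (fun cf => (cf, gl.1)))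

set_option maxRecDepth 100000 in
theorem items_cfop_to_group : CFOP_TO_GROUP.items = CFOP_PAIRS := by decide

set_option maxRecDepth 100000 in
theorem nodup_cfop_keys : (CFOP_PAIRS.map Prod.fst).Nodup := by decide

theorem keys_cfop_to_group : CFOP_TO_GROUP.keys = CFOP_PAIRS.map Prod.fst := by
  simp only [PySem.Dict.keys, items_cfop_to_group]

theorem keys_nodup_cfop_to_group : CFOP_TO_GROUP.keys.Nodup := by
  rw [keys_cfop_to_group]; exact nodup_cfop_keys

theorem contains_index_iff (c : String) :
    CFOP_TO_GROUP.contains c = PySem.Set.contains ALL_CFOPS c := by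
  apply Bool.coe_iff_coe.mp
  rw [PySem.Dict.contains_iff_mem_keys, keys_cfop_to_group, PySem.Set.contains_iff]
  simp [ALL_CFOPS, CFOP_PAIRS, PySem.Set.mem_ofList, List.mem_flatMap, List.mem_map]

theorem get?_index_iff (c g : String) :
    CFOP_TO_GROUP.get? c = some g ↔ (c, g) ∈ CFOP_PAIRS := by
  rw [PySem.Dict.get?_eq_some_iff_mem_items _ _ _ keys_nodup_cfop_to_group, items_cfop_to_group]

theorem mem_pairs_iff (c g : String) :
    (c, g) ∈ CFOP_PAIRS ↔ ∃ l, (g, l) ∈ GROUP_CFOP ∧ c ∈ l := by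
  simp only [CFOP_PAIRS, List.mem_flatMap, List.mem_map]
  constructor
  · rintro ⟨gl, hgl, cf, hcf, heq⟩
    obtain ⟨rfl, rfl⟩ : cf = c ∧ gl.1 = g := by
      simpa [Prod.ext_iff] using heq
    exact ⟨gl.2, by simpa using hgl, hcf⟩
  · rintro ⟨l, hl, hc⟩
    exact ⟨(g, l), hl, c, hc, rfl⟩

-- the loop of B returns none iff some code misses the index
theorem collect_eq_none (d : PySem.Dict String String) (l : List String) (gs : PySem.Set String) :
    collectGroups d l gs = none ↔ ∃ c ∈ l, d.get? c = none := by
  induction l generalizing gs with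
  | nil => simp [collectGroups]
  | cons c rest ih =>
    cases h : d.get? c with
    | none => simp [collectGroups, h]
    | some g =>
      simp only [collectGroups, h, ih, List.mem_cons]
      constructor
      · rintro ⟨x, hx, hn⟩; exact ⟨x, Or.inr hx, hn⟩
      · rintro ⟨x, hx | hx, hn⟩
        · subst hx; rw [h] at hn; cases hn
        · exact ⟨x, hx, hn⟩

-- when every code is found, the loop returns the fold of Set.add over the looked-up groups
theorem collect_eq_some (d : PySem.Dict String String) (l : List String) (gs : PySem.Set String)
    (h : ∀ c ∈ l, (d.get? c).isSome) :
    collectGroups d l gs = some (l.foldl (fun a c => PySem.Set.add a (d.getD c "")) gs) := by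
  induction l generalizing gs with
  | nil => simp [collectGroups]
  | cons c rest ih =>
    have hc : (d.get? c).isSome := h c (List.mem_cons_self ..)
    cases hg : d.get? c with
    | none => rw [hg] at hc; cases hc
    | some g =>
      simp only [collectGroups, hg, List.foldl_cons]
      rw [ih _ (fun x hx => h x (List.mem_cons_of_mem _ hx))]
      have hgd : d.getD c "" = g := by rw [PySem.Dict.getD_eq_get?_getD, hg]; rfl
      rw [hgd]

-- reduce B's match on the loop's result
theorem alt_of_none (cfops : List String)
    (h : collectGroups CFOP_TO_GROUP (PySem.Set.ofList cfops) PySem.Set.empty = none) :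
    classificar_cfops_py_alt cfops = ("PASSAR PARA CLASSIFICADOR", "Regra 1") := by
  simp only [classificar_cfops_py_alt]
  rw [h]

theorem alt_of_some (cfops : List String) (grupos : PySem.Set String)
    (h : collectGroups CFOP_TO_GROUP (PySem.Set.ofList cfops) PySem.Set.empty = some grupos) :
    classificar_cfops_py_alt cfops =
      (if PySem.Set.len (PySem.Set.ofList cfops) = 1 then
        (if !grupos.isEmpty then grupos.headD "" else "OUTRAS", "Regra 3")
      else if PySem.Set.len grupos = 1 then (grupos.headD "", "Regra 2-b")
      else ("OUTRAS", "Regra 2")) := by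
  simp only [classificar_cfops_py_alt]
  rw [h]

-- the two 'grupos' sets are permutations of each other
theorem grupos_perm (s : List String)
    (h : ∀ c ∈ s, CFOP_TO_GROUP.contains c = true) :
    (PySem.Set.ofList ((GROUP_CFOP.filter
        (fun gl => !(PySem.Set.inter s (PySem.Set.ofList gl.2)).isEmpty)).map (fun gl => gl.1))).Perm
      (PySem.Set.ofList (s.map (fun c => CFOP_TO_GROUP.getD c ""))) := by
  apply (List.perm_ext_iff_of_nodup (PySem.Set.nodup_ofList _) (PySem.Set.nodup_ofList _)).mpr
  intro g
  rw [PySem.Set.mem_ofList, PySem.Set.mem_ofList]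
  constructor
  · intro hg
    simp only [List.mem_map, List.mem_filter] at hg
    obtain ⟨gl, ⟨hmem, hcond⟩, rfl⟩ := hg
    rw [Bool.not_eq_true'] at hcond
    obtain ⟨c, hci⟩ := List.isEmpty_eq_false_iff_exists_mem.mp hcond
    rw [PySem.Set.mem_inter] at hci
    obtain ⟨hcs, hcl⟩ := hci
    rw [PySem.Set.mem_ofList] at hcl
    have hget : CFOP_TO_GROUP.get? c = some gl.1 :=
      (get?_index_iff c gl.1).mpr ((mem_pairs_iff c gl.1).mpr ⟨gl.2, by simpa using hmem, hcl⟩)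
    exact List.mem_map.mpr ⟨c, hcs, by rw [PySem.Dict.getD_eq_get?_getD, hget]; rfl⟩
  · intro hg
    obtain ⟨c, hcs, hget⟩ := List.mem_map.mp hg
    have hsome : CFOP_TO_GROUP.get? c = some g := by
      have hc := h c hcs
      rw [PySem.Dict.contains_eq_isSome_get?] at hc
      cases he : CFOP_TO_GROUP.get? c with
      | none => rw [he] at hc; simp at hc
      | some v =>
        rw [PySem.Dict.getD_eq_get?_getD, he] at hget
        simpa using hget
    obtain ⟨l, hl, hcl⟩ := (mem_pairs_iff c g).mp ((get?_index_iff c g).mp hsome)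
    refine List.mem_map.mpr ⟨(g, l), List.mem_filter.mpr ⟨hl, ?_⟩, rfl⟩
    rw [Bool.not_eq_true']
    apply List.isEmpty_eq_false_iff_exists_mem.mpr
    refine ⟨c, ?_⟩
    rw [PySem.Set.mem_inter, PySem.Set.mem_ofList]
    exact ⟨hcs, hcl⟩

-- ===== VERDICT =====
theorem classificar_cfops_py_spec : Claim_equal_classificar_cfops_py := by
  intro cfops _
  unfold Spec_classificar_cfops_py
  simp only [classificar_cfops_py]
  set s : PySem.Set String := PySem.Set.ofList cfops with hs
  by_cases hbad : s.any (fun c => !(PySem.Set.contains ALL_CFOPS c)) = true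
  · rw [if_pos hbad]
    obtain ⟨c, hcs, hcn⟩ := List.any_eq_true.mp hbad
    have hnone : CFOP_TO_GROUP.get? c = none := by
      rw [PySem.Dict.get?_eq_none_iff_contains, contains_index_iff]
      simpa using hcn
    rw [alt_of_none cfops ((collect_eq_none CFOP_TO_GROUP s PySem.Set.empty).mpr ⟨c, hcs, hnone⟩)]
  · rw [if_neg hbad]
    simp only [Bool.not_eq_true] at hbad
    have hall : ∀ c ∈ s, CFOP_TO_GROUP.contains c = true := by
      intro c hcm
      have := List.any_eq_false.mp hbad c hcm
      rw [contains_index_iff]; simpa using this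
    have hsome : ∀ c ∈ s, (CFOP_TO_GROUP.get? c).isSome := by
      intro c hcm
      rw [← PySem.Dict.contains_eq_isSome_get?]; exact hall c hcm
    have hfold : s.foldl (fun a c => PySem.Set.add a (CFOP_TO_GROUP.getD c "")) PySem.Set.empty
        = PySem.Set.ofList (s.map (fun c => CFOP_TO_GROUP.getD c "")) := by
      rw [PySem.Set.ofList_eq_foldl, List.foldl_map]; rfl
    rw [alt_of_some cfops _ ((collect_eq_some CFOP_TO_GROUP s PySem.Set.empty hsome).trans (by rw [hfold]))]
    have hperm := grupos_perm s hall
    set gA := PySem.Set.ofList ((GROUP_CFOP.filter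
        (fun gl => !(PySem.Set.inter s (PySem.Set.ofList gl.2)).isEmpty)).map (fun gl => gl.1)) with hga
    set gB := PySem.Set.ofList (s.map (fun c => CFOP_TO_GROUP.getD c "")) with hgb
    by_cases hlen : PySem.Set.len s = 1
    · rw [if_pos hlen, if_pos hlen]
      have hl1 : s.length = 1 := by simp [PySem.Set.len] at hlen; omega
      obtain ⟨c, hc1⟩ := List.length_eq_one_iff.mp hl1
      have hB : gB = [CFOP_TO_GROUP.getD c ""] := by rw [hgb, hc1]; rfl
      have hA : gA = [CFOP_TO_GROUP.getD c ""] := List.Perm.eq_singleton (hB ▸ hperm)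
      rw [hA, hB]
    · rw [if_neg hlen, if_neg hlen]
      by_cases h1 : PySem.Set.len gB = 1
      · have hl1 : gB.length = 1 := by simp [PySem.Set.len] at h1; omega
        obtain ⟨g, hg1⟩ := List.length_eq_one_iff.mp hl1
        have hA : gA = [g] := List.Perm.eq_singleton (hg1 ▸ hperm)
        have h1A : PySem.Set.len gA = 1 := by rw [hA]; rfl
        rw [if_pos h1A, if_pos h1, hA, hg1]
        by_cases ho : g = "OUTRAS"
        · simp [ho]
        · simp [ho]
      · have h1A : ¬ PySem.Set.len gA = 1 := by
          rw [show PySem.Set.len gA = PySem.Set.len gB by simp [PySem.Set.len, hperm.length_eq]]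
          exact h1
        rw [if_neg h1A, if_neg h1]
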